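-- pv_equiv track=rewrite | github.com/herrkrueger/piznet | analyzers/technology.py | _estimate_strategic_value
-- ===== SOURCE A (Python) =====
-- def _estimate_strategic_value(subclass: str) -> str:
--     """Estimate strategic value based on subclass."""
--     # Critical technologies for modern industry
--     critical_prefixes = ['C22', 'H01', 'Y02', 'A61']
--     if any(subclass.startswith(prefix) for prefix in critical_prefixes):
--         return 'Critical'
--
--     # High-value technologies
--     high_value_prefixes = ['G06', 'C07', 'C08', 'H02']
--     if any(subclass.startswith(prefix) for prefix in high_value_prefixes):
--         return 'High'
--
--     # Strategic but not critical
--     strategic_prefixes = ['G01', 'F01', 'B01']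
--     if any(subclass.startswith(prefix) for prefix in strategic_prefixes):
--         return 'Strategic'
--
--     return 'Standard'
-- ===== SOURCE B (Python) =====
-- _TIERS = {
--     'C22': 'Critical', 'H01': 'Critical', 'Y02': 'Critical', 'A61': 'Critical',
--     'G06': 'High', 'C07': 'High', 'C08': 'High', 'H02': 'High',
--     'G01': 'Strategic', 'F01': 'Strategic', 'B01': 'Strategic',
-- }
--
--
-- def _estimate_strategic_value(subclass: str) -> str:
--     """Estimate strategic value based on subclass."""
--     return _TIERS.get(subclass[:3], 'Standard')
-- ===== Notes on version B (the rewrite author's own statement) =====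
-- stated objective: idiomatic
-- what changed: Replaced the three sequential any()-over-prefix-list scans by a single precomputed prefix-to-tier dict looked up with subclass[:3] (all prefixes have length 3 and are disjoint).
import Mathlib
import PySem

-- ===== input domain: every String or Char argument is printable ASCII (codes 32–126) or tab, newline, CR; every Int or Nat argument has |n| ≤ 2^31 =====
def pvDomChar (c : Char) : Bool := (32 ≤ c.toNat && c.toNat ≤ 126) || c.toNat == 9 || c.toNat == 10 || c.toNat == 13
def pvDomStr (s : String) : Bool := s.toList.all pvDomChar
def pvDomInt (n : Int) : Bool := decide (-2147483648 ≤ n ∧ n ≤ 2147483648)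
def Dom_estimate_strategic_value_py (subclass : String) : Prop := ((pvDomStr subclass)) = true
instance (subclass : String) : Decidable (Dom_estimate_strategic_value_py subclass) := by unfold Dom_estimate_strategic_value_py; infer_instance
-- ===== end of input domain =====

-- B replaces A's three sequential any()-over-prefix-list scans by one precomputed
-- prefix→tier dict looked up with subclass[:3] (idiomatic table lookup; same values).

-- ===== PORT A =====
def estimate_strategic_value_py (subclass : String) : String :=
  if ["C22", "H01", "Y02", "A61"].any (fun p => PySem.Str.startswith subclass p) then "Critical"
  else if ["G06", "C07", "C08", "H02"].any (fun p => PySem.Str.startswith subclass p) then "High"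
  else if ["G01", "F01", "B01"].any (fun p => PySem.Str.startswith subclass p) then "Strategic"
  else "Standard"

-- ===== PORT B =====
-- the module-level _TIERS dict of Source B
def pvTiersTable : PySem.Dict String String := PySem.Dict.ofList
  [("C22", "Critical"), ("H01", "Critical"), ("Y02", "Critical"), ("A61", "Critical"),
   ("G06", "High"), ("C07", "High"), ("C08", "High"), ("H02", "High"),
   ("G01", "Strategic"), ("F01", "Strategic"), ("B01", "Strategic")]

def estimate_strategic_value_py_alt (subclass : String) : String :=
  pvTiersTable.getD (PySem.Str.slice subclass none (some 3)) "Standard"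

-- ===== PRECONDITION & SPEC =====
def Spec_estimate_strategic_value_py (subclass : String) (out : String) : Prop := out = estimate_strategic_value_py_alt subclass
instance (subclass : String) (out : String) : Decidable (Spec_estimate_strategic_value_py subclass out) := by unfold Spec_estimate_strategic_value_py; infer_instance

-- ===== CLAIM (what is proved, stated in full; the proofs are below) =====
def Claim_equal_estimate_strategic_value_py : Prop := ∀ (subclass : String), Dom_estimate_strategic_value_py subclass → Spec_estimate_strategic_value_py subclass (estimate_strategic_value_py subclass)

-- ===== LEMMAS AND PROOFS =====
theorem pv_isPrefixOf_eq_take (p s : List Char) : p.isPrefixOf s = decide (s.take p.length = p) := by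
  rw [Bool.eq_iff_iff, List.isPrefixOf_iff_prefix, List.prefix_iff_eq_take, decide_eq_true_eq, eq_comm]

theorem pv_string_beq_toList (x y : String) : (x == y) = decide (x.toList = y.toList) := by
  rw [Bool.eq_iff_iff, beq_iff_eq, decide_eq_true_eq]
  exact ⟨fun h => h ▸ rfl, fun h => String.toList_inj.mp h⟩

theorem pv_main (s : String) : estimate_strategic_value_py s = estimate_strategic_value_py_alt s := by
  have hsl : PySem.Chars.slice s.toList none (some 3) = s.toList.take 3 := by
    simpa using PySem.List.slice_to_natCast (xs := s.toList) (b := 3)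
  have hT : pvTiersTable.items =
      [("C22", "Critical"), ("H01", "Critical"), ("Y02", "Critical"), ("A61", "Critical"),
       ("G06", "High"), ("C07", "High"), ("C08", "High"), ("H02", "High"),
       ("G01", "Strategic"), ("F01", "Strategic"), ("B01", "Strategic")] := by decide
  simp only [estimate_strategic_value_py, estimate_strategic_value_py_alt, List.any_cons,
    List.any_nil, PySem.Str.startswith, PySem.Chars.startswith, pv_isPrefixOf_eq_take,
    PySem.Dict.getD, PySem.Dict.get?, PySem.Str.slice, hT, hsl, List.find?, pv_string_beq_toList]
  by_cases hC22 : List.take 3 s.toList = ['C', '2', '2']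
  · simp [hC22]
  by_cases hH01 : List.take 3 s.toList = ['H', '0', '1']
  · simp [hH01]
  by_cases hY02 : List.take 3 s.toList = ['Y', '0', '2']
  · simp [hY02]
  by_cases hA61 : List.take 3 s.toList = ['A', '6', '1']
  · simp [hA61]
  by_cases hG06 : List.take 3 s.toList = ['G', '0', '6']
  · simp [hG06]
  by_cases hC07 : List.take 3 s.toList = ['C', '0', '7']
  · simp [hC07]
  by_cases hC08 : List.take 3 s.toList = ['C', '0', '8']
  · simp [hC08]
  by_cases hH02 : List.take 3 s.toList = ['H', '0', '2']
  · simp [hH02]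
  by_cases hG01 : List.take 3 s.toList = ['G', '0', '1']
  · simp [hG01]
  by_cases hF01 : List.take 3 s.toList = ['F', '0', '1']
  · simp [hF01]
  by_cases hB01 : List.take 3 s.toList = ['B', '0', '1']
  · simp [hB01]
  have hC22' : ¬(['C', '2', '2'] = List.take 3 s.toList) := fun h => hC22 h.symm
  have hH01' : ¬(['H', '0', '1'] = List.take 3 s.toList) := fun h => hH01 h.symm
  have hY02' : ¬(['Y', '0', '2'] = List.take 3 s.toList) := fun h => hY02 h.symm
  have hA61' : ¬(['A', '6', '1'] = List.take 3 s.toList) := fun h => hA61 h.symm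
  have hG06' : ¬(['G', '0', '6'] = List.take 3 s.toList) := fun h => hG06 h.symm
  have hC07' : ¬(['C', '0', '7'] = List.take 3 s.toList) := fun h => hC07 h.symm
  have hC08' : ¬(['C', '0', '8'] = List.take 3 s.toList) := fun h => hC08 h.symm
  have hH02' : ¬(['H', '0', '2'] = List.take 3 s.toList) := fun h => hH02 h.symm
  have hG01' : ¬(['G', '0', '1'] = List.take 3 s.toList) := fun h => hG01 h.symm
  have hF01' : ¬(['F', '0', '1'] = List.take 3 s.toList) := fun h => hF01 h.symm
  have hB01' : ¬(['B', '0', '1'] = List.take 3 s.toList) := fun h => hB01 h.symm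
  simp [hC22, hC22', hH01, hH01', hY02, hY02', hA61, hA61', hG06, hG06', hC07, hC07', hC08, hC08', hH02, hH02', hG01, hG01', hF01, hF01', hB01, hB01']

-- ===== VERDICT (by name: the statement is the Claim_ definition above) =====
theorem estimate_strategic_value_py_spec : Claim_equal_estimate_strategic_value_py := by
  intro subclass _
  unfold Spec_estimate_strategic_value_py
  exact pv_main subclass
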